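-- pv_equiv track=rewrite | github.com/GeorgMiller/Hypernetworks | DouDizhu/doudizhu/utils.py | encode_cards_conv
-- ===== SOURCE A (Python) =====
-- CARD_RANK_STR = ['3', '4', '5', '6', '7', '8', '9', 'T', 'J', 'Q', 'K',
--                  'A', '2', 'B', 'R']
--
-- def encode_cards_conv(plane, cards):
--     #### change the card encoding for convolutional layers ####
--     ''' Encode cards and represent it into plane.
--     Args:
--         cards (list or str): list or str of cards, every entry is a
--     character of solo representation of card
--
--     column: rank of the cards(in the order: 3456789TJQK2BR)
--     row: if the player has a certain number of cards for a certain rank (0, 1, 2, 3, 4)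
--
--     e.g.,
--     '6788889JQQKK222':
--      [0 0 0 1 1 1 1 0 1 1 1 0 1 0 0]
--      [0 0 0 0 0 1 0 0 0 1 1 0 1 0 0]
--      [0 0 0 0 0 1 0 0 0 0 0 0 1 0 0]
--      [0 0 0 0 0 1 0 0 0 0 0 0 0 0 0]]
--
--     if player has '8888': in 6th column 2-5th row are 1s, and 1st row is 0.
--     Note: 1st row of any rank of card is 1 iff player does not have that card at all.
--     '''
--
--     if not cards:
--         return None
--     layer = 0
--     if len(cards) == 1:
--         rank = CARD_RANK_STR.index(cards[0])
--         plane[layer][rank] = 1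
--     else:
--         for index, card in enumerate(cards):
--             if index == 0:
--                 continue
--             if card == cards[index - 1]:
--                 rank = CARD_RANK_STR.index(cards[index - 1])
--                 plane[layer][rank] = 1
--                 layer += 1
--             else:
--                 rank = CARD_RANK_STR.index(cards[index - 1])
--                 plane[layer][rank] = 1
--                 layer = 0
--         rank = CARD_RANK_STR.index(cards[-1])
--         plane[layer][rank] = 1
--     return plane
-- ===== SOURCE B (Python) =====
-- CARD_RANK_STR = ['3', '4', '5', '6', '7', '8', '9', 'T', 'J', 'Q', 'K',
--                  'A', '2', 'B', 'R']
--
-- def encode_cards_conv(plane, cards):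
--     # Run-length grouping: walk maximal runs of equal consecutive cards;
--     # a run of length L of rank r sets plane[0..L-1][r] = 1.
--     if not cards:
--         return None
--     i = 0
--     n = len(cards)
--     while i < n:
--         j = i + 1
--         while j < n and cards[j] == cards[i]:
--             j += 1
--         rank = CARD_RANK_STR.index(cards[i])
--         for r in range(j - i):
--             plane[r][rank] = 1
--         i = j
--     return plane
-- ===== Notes on version B (the rewrite author's own statement) =====
-- stated objective: idiomatic
-- what changed: A's per-index adjacency bookkeeping with a resettable layer counter is replaced by explicit run-length grouping: scan each maximal run of equal consecutive cards once, look its rank up once, and set rows 0..L-1 of that rank's column.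
import Mathlib
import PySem

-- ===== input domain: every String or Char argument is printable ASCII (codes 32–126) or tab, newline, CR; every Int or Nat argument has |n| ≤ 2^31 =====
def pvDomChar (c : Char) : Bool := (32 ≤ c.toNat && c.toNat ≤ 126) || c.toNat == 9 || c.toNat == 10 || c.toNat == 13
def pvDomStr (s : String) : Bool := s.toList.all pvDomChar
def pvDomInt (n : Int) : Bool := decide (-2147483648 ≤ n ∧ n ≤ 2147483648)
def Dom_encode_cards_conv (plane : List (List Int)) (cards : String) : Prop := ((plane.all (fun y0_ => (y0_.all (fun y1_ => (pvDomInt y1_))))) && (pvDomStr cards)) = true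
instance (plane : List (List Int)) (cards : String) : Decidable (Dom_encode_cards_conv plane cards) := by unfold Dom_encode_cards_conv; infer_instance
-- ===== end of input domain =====

-- B replaces A's layer-counter adjacency bookkeeping by explicit run-length grouping
-- (same cells of `plane` are set to 1; the in-place mutation of `plane` is identical on Pre_,
-- the proved equivalence is about the returned value).

-- CARD_RANK_STR, as characters (every entry of the Python list is a single character)
def pvRanks : List Char :=
  ['3', '4', '5', '6', '7', '8', '9', 'T', 'J', 'Q', 'K', 'A', '2', 'B', 'R']

-- plane[i][j] = 1 for natural-number indices; none exactly where Python raises IndexError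
def pvSet2 (plane : List (List Int)) (i j : Nat) : Option (List (List Int)) :=
  match plane[i]? with
  | none => none
  | some row => if j < row.length then some (plane.set i (row.set j 1)) else none

-- ===== PORT A =====
-- the `for index, card in enumerate(cards)` loop (index ≥ 1); state = (prev = cards[index-1], layer, plane)
def pvALoop : List Char → Char → Nat → List (List Int) → Option (Nat × List (List Int))
  | [], _, layer, plane => some (layer, plane)
  | cur :: rest, prev, layer, plane =>
    if cur == prev then
      match PySem.List.index? pvRanks prev with
      | none => none
      | some rank =>
        match pvSet2 plane layer rank with
        | none => none
        | some p => pvALoop rest cur (layer + 1) p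
    else
      match PySem.List.index? pvRanks prev with
      | none => none
      | some rank =>
        match pvSet2 plane layer rank with
        | none => none
        | some p => pvALoop rest cur 0 p

def encode_cards_conv (plane : List (List Int)) (cards : String) : Option (List (List Int)) :=
  match cards.toList with
  | [] => none                                   -- `if not cards: return None`
  | [c] =>                                       -- `len(cards) == 1`
    match PySem.List.index? pvRanks c with       -- ValueError → none
    | none => none
    | some rank => pvSet2 plane 0 rank
  | c :: d :: rest =>
    match pvALoop (d :: rest) c 0 plane with
    | none => none
    | some (layer, p) =>
      match PySem.List.pyGet? (c :: d :: rest) (-1) with    -- cards[-1]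
      | none => none
      | some last =>
        match PySem.List.index? pvRanks last with
        | none => none
        | some rank => pvSet2 p layer rank

-- ===== PORT B =====
-- inner `while j < n and cards[j] == cards[i]` scan: length of the run continuing with c
def pvRunLen (c : Char) : List Char → Nat
  | [] => 0
  | d :: rest => if d == c then pvRunLen c rest + 1 else 0

-- `for r in range(L): plane[r][rank] = 1`
def pvSetLayers (rank : Nat) : List (List Int) → List Nat → Option (List (List Int))
  | plane, [] => some plane
  | plane, r :: rs =>
    match pvSet2 plane r rank with
    | none => none
    | some p => pvSetLayers rank p rs

-- outer `while i < n` loop over maximal runs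
def pvBLoop : List Char → List (List Int) → Option (List (List Int))
  | [], plane => some plane
  | c :: rest, plane =>
    match PySem.List.index? pvRanks c with
    | none => none
    | some rank =>
      match pvSetLayers rank plane (List.range (pvRunLen c rest + 1)) with
      | none => none
      | some p => pvBLoop (rest.drop (pvRunLen c rest)) p
termination_by l _ => l.length
decreasing_by simp

def encode_cards_conv_alt (plane : List (List Int)) (cards : String) : Option (List (List Int)) :=
  match cards.toList with
  | [] => none
  | c :: rest => pvBLoop (c :: rest) plane

-- ===== PRECONDITION & SPEC =====
def pvRankOf (c : Char) : Nat := pvRanks.idxOf c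

-- Exactly the inputs on which the Python A returns: every card is in CARD_RANK_STR, and for
-- every maximal run of equal consecutive cards of length L at rank r, plane has at least L rows
-- and rows 0..L-1 each have more than r columns (else A raises ValueError / IndexError).
def Pre_encode_cards_conv (plane : List (List Int)) (cards : String) : Prop :=
  (cards.toList.isEmpty ||
   (cards.toList.all (fun c => pvRanks.contains c) &&
    (List.range cards.toList.length).all (fun i =>
      (List.range cards.toList.length).all (fun j =>
        !(decide (i ≤ j) &&
          (List.range cards.toList.length).all (fun t =>
            !(decide (i ≤ t) && decide (t ≤ j)) ||
            (cards.toList.getD t ' ' == cards.toList.getD i ' '))) ||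
        (decide (j - i < plane.length) &&
         decide (pvRankOf (cards.toList.getD i ' ') < (plane.getD (j - i) []).length)))))) = true
instance (plane : List (List Int)) (cards : String) : Decidable (Pre_encode_cards_conv plane cards) := by unfold Pre_encode_cards_conv; infer_instance

def pvWitness_encode_cards_conv : List (List Int) × String := ([[0], [0]], "33")

def Spec_encode_cards_conv (plane : List (List Int)) (cards : String) (out : Option (List (List Int))) : Prop := out = encode_cards_conv_alt plane cards
instance (plane : List (List Int)) (cards : String) (out : Option (List (List Int))) : Decidable (Spec_encode_cards_conv plane cards out) := by unfold Spec_encode_cards_conv; infer_instance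

-- ===== CLAIM (what is proved, stated in full; the proofs are below) =====
def Claim_equal_encode_cards_conv : Prop := ∀ (plane : List (List Int)) (cards : String), Dom_encode_cards_conv plane cards → Pre_encode_cards_conv plane cards → Spec_encode_cards_conv plane cards (encode_cards_conv plane cards)

-- ===== LEMMAS AND PROOFS =====

-- A's loop followed by the final `plane[layer][CARD_RANK_STR.index(cards[-1])] = 1`
def pvAFin (c : Char) (rest : List Char) (k : Nat) (plane : List (List Int)) : Option (List (List Int)) :=
  match pvALoop rest c k plane with
  | none => none
  | some (layer, p) =>
    match PySem.List.index? pvRanks ((c :: rest).getLast (by simp)) with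
    | none => none
    | some rank => pvSet2 p layer rank

-- B's loop with the first run's rows offset by k (proof generalisation of pvBLoop)
def pvBOff : Nat → List Char → List (List Int) → Option (List (List Int))
  | _, [], plane => some plane
  | k, c :: rest, plane =>
    match PySem.List.index? pvRanks c with
    | none => none
    | some rank =>
      match pvSetLayers rank plane (List.range' k (pvRunLen c rest + 1)) with
      | none => none
      | some p => pvBLoop (rest.drop (pvRunLen c rest)) p

theorem pvBLoop_eq_pvBOff (l : List Char) (plane : List (List Int)) :
    pvBLoop l plane = pvBOff 0 l plane := by
  cases l with
  | nil => simp [pvBLoop, pvBOff]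
  | cons c rest => simp [pvBLoop, pvBOff, List.range_eq_range']

theorem pvMain (rest : List Char) : ∀ (c : Char) (k : Nat) (plane : List (List Int)),
    pvAFin c rest k plane = pvBOff k (c :: rest) plane := by
  induction rest with
  | nil =>
    intro c k plane
    cases hr : List.idxOf? c pvRanks with
    | none => simp [pvAFin, pvALoop, pvBOff, hr]
    | some rank =>
      cases hs : pvSet2 plane k rank with
      | none =>
        simp [pvAFin, pvALoop, pvBOff, pvRunLen, pvSetLayers, List.range'_one, hr, hs]
      | some p =>
        simp [pvAFin, pvALoop, pvBOff, pvRunLen, pvSetLayers, pvBLoop, List.range'_one, hr, hs]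
  | cons d rest' ih =>
    intro c k plane
    by_cases hdc : d = c
    · subst hdc
      cases hr : List.idxOf? d pvRanks with
      | none => simp [pvAFin, pvALoop, pvBOff, hr]
      | some rank =>
        cases hs : pvSet2 plane k rank with
        | none =>
          simp [pvAFin, pvALoop, pvBOff, pvRunLen, pvSetLayers, List.range'_succ, hr, hs]
        | some p =>
          have hfin : pvAFin d (d :: rest') k plane = pvAFin d rest' (k + 1) p := by
            simp [pvAFin, pvALoop, hr, hs, List.getLast_cons]
          rw [hfin, ih d (k + 1) p]
          simp [pvBOff, pvRunLen, pvSetLayers, List.range'_succ, hr, hs]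
    · have hne : (d == c) = false := beq_eq_false_iff_ne.mpr hdc
      cases hr : List.idxOf? c pvRanks with
      | none => simp [pvAFin, pvALoop, pvBOff, hne, hr]
      | some rank =>
        cases hs : pvSet2 plane k rank with
        | none =>
          simp [pvAFin, pvALoop, pvBOff, pvRunLen, pvSetLayers, List.range'_one, hne, hr, hs]
        | some p =>
          have hfin : pvAFin c (d :: rest') k plane = pvAFin d rest' 0 p := by
            simp [pvAFin, pvALoop, hne, hr, hs, List.getLast_cons]
          rw [hfin, ih d 0 p, ← pvBLoop_eq_pvBOff]
          simp [pvBOff, pvRunLen, pvSetLayers, List.range'_one, hne, hr, hs]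

theorem encode_cards_conv_spec : Claim_equal_encode_cards_conv := by
  intro plane cards _ _
  unfold Spec_encode_cards_conv
  match h : cards.toList with
  | [] => simp [encode_cards_conv, encode_cards_conv_alt, h]
  | [c] =>
    simp only [encode_cards_conv, encode_cards_conv_alt, h, pvBLoop_eq_pvBOff, ← pvMain]
    simp [pvAFin, pvALoop]
  | c :: d :: rest =>
    simp only [encode_cards_conv, encode_cards_conv_alt, h, pvBLoop_eq_pvBOff, ← pvMain]
    cases hl : pvALoop (d :: rest) c 0 plane with
    | none => simp [pvAFin, hl]
    | some lp =>
      simp [pvAFin, hl, PySem.List.pyGet?_neg_one, List.getLast?_eq_some_getLast]
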